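-- pv_equiv track=rewrite | github.com/MrBrantCode/unitest_baseline | mut_generate/mist_train_cf/cf_21141/solution.py | longest_consecutive_string
-- ===== SOURCE A (Python) =====
-- def longest_consecutive_string(string):
--     if len(string) == 0:
--         return 0
--
--     max_length = 1
--     current_length = 1
--
--     for i in range(1, len(string)):
--         if string[i] != string[i-1]:
--             current_length += 1
--         else:
--             if current_length > max_length:
--                 max_length = current_length
--             current_length = 1
--
--     if current_length > max_length:
--         max_length = current_length
--
--     return max_length
-- ===== SOURCE B (Python) =====
-- def longest_consecutive_string(string):
--     if len(string) == 0:
--         return 0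
--     bounds = [0] + [i for i in range(1, len(string)) if string[i] == string[i-1]] + [len(string)]
--     gaps = [b - a for a, b in zip(bounds, bounds[1:])]
--     return max(gaps)
-- ===== Notes on version B (the rewrite author's own statement) =====
-- stated objective: alternative
-- what changed: Replaces the online running-max/current-length accumulator with a two-phase decomposition: first collect the run-break indices (i with s[i]==s[i-1]) bracketed by 0 and len(s), then return the maximum gap between adjacent boundaries.
import Mathlib
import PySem

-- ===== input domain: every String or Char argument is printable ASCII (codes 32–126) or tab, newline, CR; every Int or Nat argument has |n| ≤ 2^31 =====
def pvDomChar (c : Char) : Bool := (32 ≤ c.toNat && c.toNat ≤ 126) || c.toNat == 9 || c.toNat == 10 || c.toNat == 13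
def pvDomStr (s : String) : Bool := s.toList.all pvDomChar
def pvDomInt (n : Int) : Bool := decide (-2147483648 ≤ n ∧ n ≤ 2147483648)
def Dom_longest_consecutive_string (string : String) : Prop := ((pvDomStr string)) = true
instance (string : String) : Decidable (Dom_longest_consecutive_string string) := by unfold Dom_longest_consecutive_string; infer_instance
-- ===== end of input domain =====

-- B replaces A's online running-max accumulator by a boundary-index list plus a max-gap pass (alternative decomposition, same cost).

-- ===== PORT A =====
-- one loop step of A: state (max_length, current_length), index i
def lcsStep (l : List Char) (q : Int × Int) (i : Int) : Int × Int :=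
  if PySem.List.pyGet? l i ≠ PySem.List.pyGet? l (i - 1) then (q.1, q.2 + 1)
  else (if q.2 > q.1 then q.2 else q.1, 1)

def longest_consecutive_string (string : String) : Int :=
  let l := string.toList
  if l.length = 0 then 0
  else
    let st := (PySem.List.pyRange 1 (l.length : Int) 1).foldl (lcsStep l) (1, 1)
    if st.2 > st.1 then st.2 else st.1

-- ===== PORT B =====
-- the break indices: i in range(1, len) with string[i] == string[i-1]
def lcsBreaks (l : List Char) : List Int :=
  (PySem.List.pyRange 1 (l.length : Int) 1).filter
    (fun i => PySem.List.pyGet? l i == PySem.List.pyGet? l (i - 1))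

def longest_consecutive_string_alt (string : String) : Int :=
  let l := string.toList
  if l.length = 0 then 0
  else
    let bounds : List Int := [0] ++ lcsBreaks l ++ [(l.length : Int)]
    let gaps := (bounds.zip bounds.tail).map (fun p => p.2 - p.1)
    match PySem.List.max? gaps (fun x => x) with
    | some m => m
    | none => 0

-- ===== PRECONDITION & SPEC =====
def Spec_longest_consecutive_string (string : String) (out : Int) : Prop := out = longest_consecutive_string_alt string
instance (string : String) (out : Int) : Decidable (Spec_longest_consecutive_string string out) := by unfold Spec_longest_consecutive_string; infer_instance

-- ===== CLAIM (what is proved, stated in full; the proofs are below) =====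
def Claim_equal_longest_consecutive_string : Prop := ∀ (string : String), Dom_longest_consecutive_string string → Spec_longest_consecutive_string string (longest_consecutive_string string)

-- ===== LEMMAS AND PROOFS =====

-- breaks up to index k (prefix of lcsBreaks)
def brkTo (l : List Char) (k : Nat) : List Int :=
  (PySem.List.pyRange 1 (k : Int) 1).filter
    (fun i => PySem.List.pyGet? l i == PySem.List.pyGet? l (i - 1))

-- running max of the gaps of (prev :: bs), seeded with m
def mxAux (m prev : Int) : List Int → Int
  | [] => m
  | b :: bs => mxAux (max m (b - prev)) b bs

-- successive differences of (prev :: bs)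
def gapsOf (prev : Int) : List Int → List Int
  | [] => []
  | b :: bs => (b - prev) :: gapsOf b bs

lemma mxAux_append (bs : List Int) : ∀ (m prev b : Int),
    mxAux m prev (bs ++ [b]) = max (mxAux m prev bs) (b - bs.getLastD prev) := by
  induction bs with
  | nil => intro m prev b; simp [mxAux]
  | cons x t ih =>
      intro m prev b
      simp only [List.cons_append, mxAux, ih]
      rcases t with _ | ⟨y, u⟩ <;> simp [List.getLastD]

lemma mxAux_eq_foldl (bs : List Int) : ∀ (m prev : Int),
    mxAux m prev bs = (gapsOf prev bs).foldl max m := by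
  induction bs with
  | nil => intro m prev; simp [mxAux, gapsOf]
  | cons b t ih => intro m prev; simp [mxAux, gapsOf, ih]

lemma zip_tail_gaps (t : List Int) : ∀ (a : Int),
    (((a :: t).zip t).map (fun p => p.2 - p.1)) = gapsOf a t := by
  induction t with
  | nil => intro a; simp [gapsOf]
  | cons b u ih =>
      intro a
      simp only [List.zip_cons_cons, List.map_cons, gapsOf]
      rw [ih b]

lemma gapsOf_append (bs : List Int) : ∀ (prev b : Int),
    gapsOf prev (bs ++ [b]) = gapsOf prev bs ++ [b - bs.getLastD prev] := by
  induction bs with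
  | nil => intro prev b; simp [gapsOf]
  | cons x t ih =>
      intro prev b
      simp only [List.cons_append, gapsOf, ih]
      rcases t with _ | ⟨y, u⟩ <;> simp [List.getLastD]

lemma foldl_max_init (t : List Int) : ∀ (a b : Int),
    t.foldl max (max a b) = max a (t.foldl max b) := by
  induction t with
  | nil => intro a b; simp
  | cons x u ih => intro a b; simp only [List.foldl]; rw [max_assoc, ih]

-- the loop invariant of A's fold: state = (max gap so far seeded with 1, distance to last break)
lemma lcs_invariant (l : List Char) : ∀ (k : Nat), 1 ≤ k →
    (PySem.List.pyRange 1 (k : Int) 1).foldl (lcsStep l) (1, 1)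
      = (mxAux 1 0 (brkTo l k), (k : Int) - (brkTo l k).getLastD 0) := by
  intro k hk
  induction k with
  | zero => omega
  | succ k ih =>
      rcases Nat.eq_or_lt_of_le hk with h1 | h1
      · -- k + 1 = 1
        have : k = 0 := by omega
        subst this
        simp [PySem.List.pyRange_one_eq_nil (by norm_num : (1:Int) ≤ 1), brkTo, mxAux]
      · have hk1 : 1 ≤ k := by omega
        have hrange : PySem.List.pyRange 1 ((k:Int) + 1) 1
            = PySem.List.pyRange 1 (k:Int) 1 ++ [(k:Int)] :=
          PySem.List.pyRange_one_succ_right (by exact_mod_cast hk1)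
        have hcast : ((k + 1 : Nat) : Int) = (k : Int) + 1 := by push_cast; ring
        rw [hcast, hrange, List.foldl_append, ih hk1, List.foldl_cons, List.foldl_nil]
        have hbrk0 : brkTo l (k + 1)
            = brkTo l k ++ (List.filter (fun i => PySem.List.pyGet? l i == PySem.List.pyGet? l (i - 1)) [(k:Int)]) := by
          simp only [brkTo, hcast, hrange, List.filter_append]
        rcases h : (PySem.List.pyGet? l (k:Int) == PySem.List.pyGet? l ((k:Int) - 1)) with _ | _
        · -- not a break: current_length += 1
          have hne : PySem.List.pyGet? l (k:Int) ≠ PySem.List.pyGet? l ((k:Int) - 1) :=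
            fun hc => by rw [hc] at h; simp at h
          have hbrk : brkTo l (k + 1) = brkTo l k := by
            rw [hbrk0, List.filter_singleton]; rw [h]; simp
          rw [hbrk, lcsStep, if_pos hne]
          simp only [Prod.mk.injEq]
          exact ⟨trivial, by ring⟩
        · -- a break: max update, current_length = 1
          have heq : PySem.List.pyGet? l (k:Int) = PySem.List.pyGet? l ((k:Int) - 1) := by
            exact eq_of_beq h
          have hbrk : brkTo l (k + 1) = brkTo l k ++ [(k:Int)] := by
            rw [hbrk0, List.filter_singleton]; rw [h]; simp
          rw [hbrk, lcsStep, if_neg (fun hc => hc heq), mxAux_append]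
          simp only [Prod.mk.injEq]
          constructor
          · simp only [max_def]; split_ifs <;> omega
          · rw [List.getLastD_concat]; ring

-- the last break index is < length (so the final gap is ≥ 1)
lemma lastD_brk_lt (l : List Char) (h : l.length ≠ 0) :
    (lcsBreaks l).getLastD 0 < (l.length : Int) := by
  by_cases hne : lcsBreaks l = []
  · rw [hne]; simp [List.getLastD]; omega
  · have hd : (lcsBreaks l).getLastD 0 = (lcsBreaks l).getLast hne := by
      rw [List.getLastD_eq_getLast?, List.getLast?_eq_some_getLast hne]; rfl
    rw [hd]
    have hmem : (lcsBreaks l).getLast hne ∈ lcsBreaks l := List.getLast_mem hne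
    have hmem2 : (lcsBreaks l).getLast hne ∈ PySem.List.pyRange 1 (l.length : Int) 1 := by
      simp only [lcsBreaks] at hmem
      exact List.mem_of_mem_filter hmem
    exact ((PySem.List.mem_pyRange_one).mp hmem2).2

theorem pv_main (string : String) :
    longest_consecutive_string string = longest_consecutive_string_alt string := by
  unfold longest_consecutive_string longest_consecutive_string_alt
  set l := string.toList with hl
  by_cases h : l.length = 0
  · rw [if_pos h, if_pos h]
  · rw [if_neg h, if_neg h]
    rw [lcs_invariant l l.length (Nat.one_le_iff_ne_zero.mpr h)]
    have hA : brkTo l l.length = lcsBreaks l := rfl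
    rw [hA]
    set n : Int := (l.length : Int) with hn
    set bs := lcsBreaks l with hbs
    set lst : Int := bs.getLastD 0 with hlst
    have hf1 : 1 ≤ n - lst := by
      have := lastD_brk_lt l h
      rw [← hbs] at this
      omega
    have hzip : (((0 :: (bs ++ [n])).zip ((0 :: (bs ++ [n])).tail)).map (fun p => p.2 - p.1))
        = gapsOf 0 bs ++ [n - lst] := by
      rw [List.tail_cons, zip_tail_gaps, gapsOf_append]
    simp only [List.cons_append, List.nil_append]
    rw [hzip, mxAux_eq_foldl]
    rcases hg : gapsOf 0 bs with _ | ⟨x, t⟩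
    · -- no interior break
      simp only [List.nil_append, List.foldl_nil, PySem.List.max?_id_cons]
      split_ifs <;> omega
    · simp only [List.cons_append, PySem.List.max?_id_cons, List.foldl_cons,
        List.foldl_append, List.foldl_nil]
      rw [foldl_max_init]
      simp only [max_def]
      split_ifs <;> omega

-- ===== VERDICT (by name: the statement is the Claim_ definition above) =====
theorem longest_consecutive_string_spec : Claim_equal_longest_consecutive_string := by
  intro s _
  unfold Spec_longest_consecutive_string
  exact pv_main s
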